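-- pv_equiv track=rewrite | github.com/jing1988a/python_fb | BestTimetoBuyandSellStockIII151.py | getRmax
-- ===== SOURCE A (Python) =====
-- def getRmax(prices , l):
--     sell=prices[l-1]
--     ans=[0 for i in range(l)]
--     cur=0
--     for i in range(l-2 , -1 , -1):
--         if sell-prices[i]>cur:
--             cur=sell-prices[i]
--         if prices[i]>sell:
--             sell=prices[i]
--         ans[i]=cur
--     return ans
-- ===== SOURCE B (Python) =====
-- def getRmax(prices, l):
--     # two backward passes: suffix-max array, then running best of (suffmax[k] - prices[k])
--     m = prices[l - 1]
--     suffmax = [0] * l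
--     for k in range(l - 1, -1, -1):
--         if prices[k] > m:
--             m = prices[k]
--         suffmax[k] = m
--     ans = [0] * l
--     best = 0
--     for k in range(l - 1, -1, -1):
--         d = suffmax[k] - prices[k]
--         if d > best:
--             best = d
--         ans[k] = best
--     return ans
-- ===== Notes on version B (the rewrite author's own statement) =====
-- stated objective: alternative
-- what changed: A keeps a running future-maximum and best profit in one backward pass; B first materialises an explicit suffix-maximum array in one backward pass and then computes the running best of suffmax[k]-prices[k] in a second backward pass.
import Mathlib
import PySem

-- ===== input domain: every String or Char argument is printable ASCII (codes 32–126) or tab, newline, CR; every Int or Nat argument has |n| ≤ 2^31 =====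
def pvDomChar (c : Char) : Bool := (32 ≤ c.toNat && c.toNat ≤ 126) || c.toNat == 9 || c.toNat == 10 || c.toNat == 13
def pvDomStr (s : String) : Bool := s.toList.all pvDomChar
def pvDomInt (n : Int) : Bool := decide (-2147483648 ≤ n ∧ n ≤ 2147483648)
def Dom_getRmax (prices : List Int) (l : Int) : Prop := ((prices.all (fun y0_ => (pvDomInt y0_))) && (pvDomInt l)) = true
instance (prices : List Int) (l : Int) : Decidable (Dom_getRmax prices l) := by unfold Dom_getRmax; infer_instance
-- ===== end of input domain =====

-- B replaces A's single backward pass carrying a running future-max with two backward passes: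
-- an explicit suffix-maximum array, then a running best of (suffmax[k] - prices[k]); same cost, different decomposition (objective: alternative).

-- ===== PORT A =====
-- loop body of A (cur then sell updated, ans[i] = cur)
def stepA (prices : List Int) (st : Int × Int × List Int) (i : Int) : Int × Int × List Int :=
  let p := PySem.List.pyGetD prices i 0
  let cur := if st.1 - p > st.2.1 then st.1 - p else st.2.1
  let sell := if p > st.1 then p else st.1
  (sell, cur, PySem.List.pySetD st.2.2 i cur)

def getRmax (prices : List Int) (l : Int) : List Int :=
  ((PySem.List.pyRange (l - 2) (-1) (-1)).foldl (stepA prices)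
    (PySem.List.pyGetD prices (l - 1) 0, 0, (PySem.List.pyRange 0 l 1).map (fun _ => (0 : Int)))).2.2

-- ===== PORT B =====
-- pass 1 body: running max of prices from the right, written into suffmax[k]
def stepB1 (prices : List Int) (st : Int × List Int) (k : Int) : Int × List Int :=
  let p := PySem.List.pyGetD prices k 0
  let m := if p > st.1 then p else st.1
  (m, PySem.List.pySetD st.2 k m)

-- pass 2 body: running best of suffmax[k] - prices[k], written into ans[k]
def stepB2 (suffmax prices : List Int) (st : Int × List Int) (k : Int) : Int × List Int :=
  let d := PySem.List.pyGetD suffmax k 0 - PySem.List.pyGetD prices k 0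
  let best := if d > st.1 then d else st.1
  (best, PySem.List.pySetD st.2 k best)

def getRmax_alt (prices : List Int) (l : Int) : List Int :=
  let suffmax := ((PySem.List.pyRange (l - 1) (-1) (-1)).foldl (stepB1 prices)
      (PySem.List.pyGetD prices (l - 1) 0, List.replicate l.toNat 0)).2
  ((PySem.List.pyRange (l - 1) (-1) (-1)).foldl (stepB2 suffmax prices)
      (0, List.replicate l.toNat 0)).2

-- ===== PRECONDITION & SPEC =====
-- Pre_ excludes exactly the inputs where Python A raises IndexError: prices[l-1] must be a
-- valid (possibly negative) Python index, and for l ≤ len every prices[i] of the loop is then valid.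
def Pre_getRmax (prices : List Int) (l : Int) : Prop :=
  PySem.Raise.InRange prices.length (l - 1) ∧ l ≤ prices.length
instance (prices : List Int) (l : Int) : Decidable (Pre_getRmax prices l) := by
  unfold Pre_getRmax; unfold PySem.Raise.InRange; infer_instance

def pvWitness_getRmax : List Int × Int := ([3, 1, 5, 2], 4)

def Spec_getRmax (prices : List Int) (l : Int) (out : List Int) : Prop := out = getRmax_alt prices l
instance (prices : List Int) (l : Int) (out : List Int) : Decidable (Spec_getRmax prices l out) := by
  unfold Spec_getRmax; infer_instance

-- ===== CLAIM (what is proved, stated in full; the proofs are below) =====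
def Claim_equal_getRmax : Prop := ∀ (prices : List Int) (l : Int), Dom_getRmax prices l → Pre_getRmax prices l → Spec_getRmax prices l (getRmax prices l)

-- ===== LEMMAS AND PROOFS =====

-- countdown list [m-1, …, 1, 0]
def cnt (m : Nat) : List Int := (List.range m).reverse.map (fun k => (k : Int))

-- suffix maximum of prices.getD over [k, k+c]
def mrec (prices : List Int) : Nat → Nat → Int
  | k, 0 => prices.getD k 0
  | k, c + 1 => max (prices.getD k 0) (mrec prices (k + 1) c)

-- A's running "cur" read at index k (fuel c = n-1-k)
def crec (prices : List Int) (n : Nat) : Nat → Nat → Int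
  | _, 0 => 0
  | k, c + 1 => max (mrec prices (k + 1) (n - 1 - (k + 1)) - prices.getD k 0) (crec prices n (k + 1) c)

-- B's running "best" read at index k (fuel c = n-k)
def brec (prices : List Int) (n : Nat) : Nat → Nat → Int
  | _, 0 => 0
  | k, c + 1 => max (mrec prices k (n - 1 - k) - prices.getD k 0) (brec prices n (k + 1) c)

lemma if_gt_max (a b : Int) : (if b > a then b else a) = max a b := by
  by_cases h : a < b
  · simp [h, max_eq_right h.le]
  · simp [h, max_eq_left (not_lt.mp h)]

lemma cnt_succ (m : Nat) : cnt (m + 1) = ((m : Int)) :: cnt m := by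
  simp [cnt, List.range_succ]

lemma pyRange_cnt (m : Nat) : PySem.List.pyRange ((m : Int) - 1) (-1) (-1) = cnt m := by
  induction m with
  | zero => rw [PySem.List.pyRange_neg_one_eq_nil (by omega)]; simp [cnt]
  | succ m ih =>
      rw [show ((m + 1 : Nat) : Int) - 1 = (m : Int) by push_cast; ring]
      rw [PySem.List.pyRange_neg_one_cons (by omega), cnt_succ, ih]

lemma getD_set_lt {xs : List Int} {i idx : Nat} {v : Int} (h : i < xs.length) :
    (xs.set i v).getD idx 0 = if idx = i then v else xs.getD idx 0 := by
  by_cases hi : idx = i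
  · subst hi; simp [List.getD_eq_getElem?_getD, List.getElem?_set_self h]
  · simp [hi, List.getD_eq_getElem?_getD, List.getElem?_set_ne (by omega : i ≠ idx)]

lemma loopA (prices : List Int) (n : Nat) :
    ∀ (m : Nat) (ans : List Int), m + 1 ≤ n → ans.length = n →
      (((cnt m).foldl (stepA prices)
          (mrec prices m (n - 1 - m), crec prices n m (n - 1 - m), ans)).2.2.length = n ∧
       ∀ idx : Nat, ((cnt m).foldl (stepA prices)
          (mrec prices m (n - 1 - m), crec prices n m (n - 1 - m), ans)).2.2.getD idx 0 =
         if idx < m then crec prices n idx (n - 1 - idx) else ans.getD idx 0) := by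
  intro m
  induction m with
  | zero => intro ans _ hlen; simp [cnt, hlen]
  | succ m ih =>
      intro ans hm hlen
      rw [cnt_succ]
      have hstep : stepA prices
          (mrec prices (m + 1) (n - 1 - (m + 1)), crec prices n (m + 1) (n - 1 - (m + 1)), ans) ((m : Int)) =
          (mrec prices m (n - 1 - m), crec prices n m (n - 1 - m), ans.set m (crec prices n m (n - 1 - m))) := by
        simp only [stepA, PySem.List.pyGetD_natCast, PySem.List.pySetD_natCast]
        have hf : n - 1 - m = (n - 1 - (m + 1)) + 1 := by omega
        simp only [Prod.mk.injEq]
        refine ⟨?_, ?_, ?_⟩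
        · rw [if_gt_max, hf]; simp only [mrec]; exact max_comm _ _
        · rw [if_gt_max, hf]; simp only [crec]; exact max_comm _ _
        · congr 1; rw [if_gt_max, hf]; simp only [crec]; exact max_comm _ _
      rw [List.foldl_cons, hstep]
      obtain ⟨h1, h2⟩ := ih (ans.set m (crec prices n m (n - 1 - m))) (by omega) (by simp [hlen])
      refine ⟨h1, fun idx => ?_⟩
      rw [h2 idx]
      by_cases hidx : idx < m
      · simp [hidx, show idx < m + 1 by omega]
      · rw [getD_set_lt (by omega)]
        by_cases he : idx = m
        · subst he; simp
        · simp [hidx, he, show ¬ idx < m + 1 by omega]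

lemma loopB1 (prices : List Int) (n : Nat) :
    ∀ (m : Nat) (suff : List Int), m ≤ n → 1 ≤ n → suff.length = n →
      (((cnt m).foldl (stepB1 prices)
          (mrec prices (min m (n - 1)) (n - 1 - min m (n - 1)), suff)).2.length = n ∧
       ∀ idx : Nat, ((cnt m).foldl (stepB1 prices)
          (mrec prices (min m (n - 1)) (n - 1 - min m (n - 1)), suff)).2.getD idx 0 =
         if idx < m then mrec prices idx (n - 1 - idx) else suff.getD idx 0) := by
  intro m
  induction m with
  | zero => intro suff _ _ hlen; simp [cnt, hlen]
  | succ m ih =>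
      intro suff hm hn hlen
      rw [cnt_succ]
      have hstep : stepB1 prices
          (mrec prices (min (m + 1) (n - 1)) (n - 1 - min (m + 1) (n - 1)), suff) ((m : Int)) =
          (mrec prices m (n - 1 - m), suff.set m (mrec prices m (n - 1 - m))) := by
        simp only [stepB1, PySem.List.pyGetD_natCast, PySem.List.pySetD_natCast]
        have key : max (mrec prices (min (m + 1) (n - 1)) (n - 1 - min (m + 1) (n - 1))) (prices.getD m 0)
            = mrec prices m (n - 1 - m) := by
          by_cases hlast : m + 1 ≤ n - 1
          · have h1 : min (m + 1) (n - 1) = m + 1 := by omega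
            have h2 : n - 1 - m = (n - 1 - (m + 1)) + 1 := by omega
            rw [h1, h2]; simp only [mrec]; exact max_comm _ _
          · have h1 : m = n - 1 := by omega
            have h2 : min (m + 1) (n - 1) = m := by omega
            have h3 : n - 1 - m = 0 := by omega
            rw [h2, h3]; simp [mrec]
        rw [if_gt_max, key]
      rw [List.foldl_cons, hstep]
      have hmm : min m (n - 1) = m := by omega
      obtain ⟨h1, h2⟩ := by
        have := ih (suff.set m (mrec prices m (n - 1 - m))) (by omega) hn (by simp [hlen])
        rwa [hmm] at this
      refine ⟨h1, fun idx => ?_⟩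
      rw [h2 idx]
      by_cases hidx : idx < m
      · simp [hidx, show idx < m + 1 by omega]
      · rw [getD_set_lt (by omega)]
        by_cases he : idx = m
        · subst he; simp
        · simp [hidx, he, show ¬ idx < m + 1 by omega]

lemma loopB2 (prices suffmax : List Int) (n : Nat)
    (hS : ∀ idx : Nat, idx < n → suffmax.getD idx 0 = mrec prices idx (n - 1 - idx)) :
    ∀ (m : Nat) (ans : List Int), m ≤ n → ans.length = n →
      (((cnt m).foldl (stepB2 suffmax prices) (brec prices n m (n - m), ans)).2.length = n ∧
       ∀ idx : Nat, ((cnt m).foldl (stepB2 suffmax prices) (brec prices n m (n - m), ans)).2.getD idx 0 =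
         if idx < m then brec prices n idx (n - idx) else ans.getD idx 0) := by
  intro m
  induction m with
  | zero => intro ans _ hlen; simp [cnt, hlen]
  | succ m ih =>
      intro ans hm hlen
      rw [cnt_succ]
      have hstep : stepB2 suffmax prices (brec prices n (m + 1) (n - (m + 1)), ans) ((m : Int)) =
          (brec prices n m (n - m), ans.set m (brec prices n m (n - m))) := by
        simp only [stepB2, PySem.List.pyGetD_natCast, PySem.List.pySetD_natCast]
        have key : max (brec prices n (m + 1) (n - (m + 1)))
            (suffmax.getD m 0 - prices.getD m 0) = brec prices n m (n - m) := by
          rw [hS m (by omega), show n - m = (n - (m + 1)) + 1 by omega]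
          simp only [brec]; exact max_comm _ _
        rw [if_gt_max, key]
      rw [List.foldl_cons, hstep]
      obtain ⟨h1, h2⟩ := ih (ans.set m (brec prices n m (n - m))) (by omega) (by simp [hlen])
      refine ⟨h1, fun idx => ?_⟩
      rw [h2 idx]
      by_cases hidx : idx < m
      · simp [hidx, show idx < m + 1 by omega]
      · rw [getD_set_lt (by omega)]
        by_cases he : idx = m
        · subst he; simp
        · simp [hidx, he, show ¬ idx < m + 1 by omega]

-- 0 ≤ brec, and brec agrees with crec (with crec (n-1) = 0 at the top index)
lemma brec_nonneg (prices : List Int) (n : Nat) : ∀ c k, k + c = n → 0 ≤ brec prices n k c := by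
  intro c
  induction c with
  | zero => intro k _; simp [brec]
  | succ c ih =>
      intro k hk
      simp only [brec]
      have := ih (k + 1) (by omega)
      omega

lemma brec_eq_crec (prices : List Int) (n : Nat) :
    ∀ c k, k + c + 1 = n → brec prices n k (n - k) = crec prices n k (n - 1 - k) := by
  intro c
  induction c with
  | zero =>
      intro k hk
      have h1 : n - k = 1 := by omega
      have h2 : n - 1 - k = 0 := by omega
      rw [h1, h2]
      simp [brec, crec, mrec, h2]
  | succ c ih =>
      intro k hk
      have h1 : n - k = (n - (k + 1)) + 1 := by omega
      have h2 : n - 1 - k = (n - 1 - (k + 1)) + 1 := by omega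
      rw [h1, h2]
      simp only [brec, crec]
      have hb := ih (k + 1) (by omega)
      have hnn := brec_nonneg prices n (n - (k + 1)) (k + 1) (by omega)
      rw [hb] at hnn
      have hm : mrec prices k (n - 1 - k) = max (prices.getD k 0) (mrec prices (k + 1) (n - 1 - (k + 1))) := by
        rw [show n - 1 - k = (n - 1 - (k + 1)) + 1 by omega]; simp [mrec]
      rw [hb, hm]
      omega

lemma getD_map_const_zero (xs : List Int) (idx : Nat) :
    (xs.map (fun _ => (0 : Int))).getD idx 0 = 0 := by
  induction xs generalizing idx with
  | nil => simp
  | cons x xs ih => cases idx with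
      | zero => simp
      | succ j => rw [List.map_cons, List.getD_cons_succ]; exact ih j

lemma getD_replicate_zero (n idx : Nat) : (List.replicate n (0 : Int)).getD idx 0 = 0 := by
  by_cases h : idx < n
  · simp [List.getD_eq_getElem?_getD, h]
  · simp [List.getD_eq_getElem?_getD, h]

-- the ports agree on every input (Pre_ only marks where the Python A returns)
lemma ports_eq (prices : List Int) (l : Int) : getRmax prices l = getRmax_alt prices l := by
  by_cases hl : l ≤ 0
  · have h0 : l.toNat = 0 := by omega
    simp [getRmax, getRmax_alt, PySem.List.pyRange_one_eq_nil hl,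
      PySem.List.pyRange_neg_one_eq_nil (show l - 2 ≤ -1 by omega),
      PySem.List.pyRange_neg_one_eq_nil (show l - 1 ≤ -1 by omega), h0]
  · set n := l.toNat with hn
    have hn1 : 1 ≤ n := by omega
    have hlc : l = (n : Int) := by omega
    have hr1 : PySem.List.pyRange (l - 1) (-1) (-1) = cnt n := by
      rw [hlc]; exact pyRange_cnt n
    have hr2 : PySem.List.pyRange (l - 2) (-1) (-1) = cnt (n - 1) := by
      rw [show l - 2 = ((n - 1 : Nat) : Int) - 1 by omega]; exact pyRange_cnt (n - 1)
    have hg : PySem.List.pyGetD prices (l - 1) 0 = prices.getD (n - 1) 0 := by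
      rw [show l - 1 = ((n - 1 : Nat) : Int) by omega, PySem.List.pyGetD_natCast]
    -- A side
    have e1 : mrec prices (n - 1) 0 = prices.getD (n - 1) 0 := by simp [mrec]
    have e2 : crec prices n (n - 1) 0 = (0 : Int) := by simp [crec]
    have e3 : brec prices n n 0 = (0 : Int) := by simp [brec]
    have hlenA : ((PySem.List.pyRange 0 l 1).map (fun _ => (0 : Int))).length = n := by
      simp [PySem.List.length_pyRange_one]; omega
    have hA := loopA prices n (n - 1) ((PySem.List.pyRange 0 l 1).map (fun _ => (0 : Int)))
      (by omega) hlenA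
    rw [show n - 1 - (n - 1) = 0 by omega, e1, e2] at hA
    -- B side
    have hB1 := loopB1 prices n n (List.replicate n 0) (le_refl n) hn1 (by simp)
    rw [show min n (n - 1) = n - 1 by omega, show n - 1 - (n - 1) = 0 by omega, e1] at hB1
    obtain ⟨hB1len, hB1get⟩ := hB1
    set S := ((cnt n).foldl (stepB1 prices) (prices.getD (n - 1) 0, List.replicate n 0)).2 with hSdef
    have hS : ∀ idx : Nat, idx < n → S.getD idx 0 = mrec prices idx (n - 1 - idx) := by
      intro idx hidx
      rw [hB1get idx]; simp [hidx]
    have hB2 := loopB2 prices S n hS n (List.replicate n 0) (le_refl n) (by simp)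
    rw [show n - n = 0 by omega, e3] at hB2
    -- assemble
    simp only [getRmax, getRmax_alt]
    rw [hr1, hr2, hg, ← hn]
    obtain ⟨hAlen, hAget⟩ := hA
    obtain ⟨hB2len, hB2get⟩ := hB2
    apply List.ext_getElem (by rw [hAlen, hB2len])
    intro i hi1 hi2
    have hi : i < n := by rwa [hAlen] at hi1
    have gA : _ := hAget i
    have gB : _ := hB2get i
    rw [List.getD_eq_getElem?_getD, List.getElem?_eq_getElem hi1] at gA
    rw [List.getD_eq_getElem?_getD, List.getElem?_eq_getElem hi2] at gB
    simp only [Option.getD_some] at gA gB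
    rw [gA, gB]
    rw [getD_map_const_zero, getD_replicate_zero]
    simp only [show i < n from hi, if_true]
    by_cases htop : i < n - 1
    · rw [if_pos htop, brec_eq_crec prices n (n - 1 - i) i (by omega)]
    · have : i = n - 1 := by omega
      subst this
      rw [if_neg (by omega)]
      rw [show n - (n - 1) = 1 by omega]
      simp [brec, mrec]

-- ===== VERDICT (by name: the statement is the Claim_ definition above) =====
theorem getRmax_spec : Claim_equal_getRmax := by
  intro prices l _ _
  unfold Spec_getRmax
  exact ports_eq prices l
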